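-- pv_equiv track=rewrite | github.com/cchrewrite/ambm | ambm_ver_0.2.0/src/python/RepSimpLib.py | make_all_bsubst_relations
-- ===== SOURCE A (Python) =====
-- def set_to_string(s):
--     y = "bset"
--     ss = sorted(s)
--     for x in ss:
--         y = y + "_" + str(x)
--     if y == "bset":
--         y = "bsetEmpty"
--     return y
--
-- def make_set_names(P):
--     res = []
--     for x in P:
--         y = set_to_string(x)
--         res.append(y)
--     return res
--
-- def sub_sets(S, N = -1):
--
--     subsets = [[]]
--
--     if N == -1:
--         MaxN = len(S)
--     else:
--         MaxN = N
--
--     while True: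
--         newsets = []
--         for x in subsets:
--             for u in S:
--                 if u in x: continue
--                 y = sorted(x + [u])
--                 if y in subsets: continue
--                 if y in newsets: continue
--                 if len(y) > MaxN: continue
--                 newsets.append(y)
--                 flag = True
--         if newsets == []: break
--         subsets = subsets + newsets
--     subsets = sorted(subsets)
--     """
--     for i in range(len(S) + 1):
--
--         for j in range(i + 1, len(S) + 1):
--
--             sub = S[i:j]
--             if len(sub) <= MaxN:
--                 subsets.append(sub)
--             else:
--                 break
--     """
--     return subsets
--
-- def make_partial_order_relation_of_set(S, N = -1):
--     P = sub_sets(S,N)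
--     Names = make_set_names(P)
--     res = []
--     for i in range(len(P)):
--         x = P[i]
--         xs = set(x)
--         pname = "bsubst_of_%s"%Names[i]
--         res.append("")
--         res.append("% \"bsubst_of\" relations for " + Names[i] + ".\n")
--         decl = ":- modeb(*,%s(+bobj))?"%pname
--         res.append(decl)
--         for j in range(len(P)):
--             y = P[j]
--             ys = set(y)
--             if ys.issubset(xs):# and not(xs.issubset(ys)):
--                 rel = "%s(%s)."%(pname,Names[j])
--                 res.append(rel)
--     return res
--
-- def make_all_bsubst_relations(SType,N = -1):
--     res = ["% \"bsubst\" relations.\n"]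
--     t = []
--     res = []
--     for S in SType:
--         if S[0] != "bSet": continue
--         SS = make_partial_order_relation_of_set(S[1:len(S)])
--         res = res + SS
--         #for x in SS:
--         #    if x in res: continue
--         #    res.append(x)
--     return res
-- ===== SOURCE B (Python) =====
-- def make_all_bsubst_relations(SType, N=-1):
--     res = []
--     for S in SType:
--         if S[0] != "bSet":
--             continue
--         subsets = [[]]
--         for u in sorted(set(S[1:])):
--             subsets = subsets + [x + [u] for x in subsets]
--         P = sorted(subsets)
--         names = ["_".join(["bset"] + x) if x else "bsetEmpty" for x in P]
--         sets = [frozenset(x) for x in P]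
--         pairs = list(zip(names, sets))
--         res += [line
--                 for nx, xs in pairs
--                 for line in ["",
--                              "% \"bsubst_of\" relations for " + nx + ".\n",
--                              ":- modeb(*,bsubst_of_" + nx + "(+bobj))?"]
--                             + ["bsubst_of_" + nx + "(" + ny + ")."
--                                for ny, ys in pairs
--                                if ys <= xs]]
--     return res
-- ===== Notes on version B (the rewrite author's own statement) =====
-- stated objective: alternative
-- what changed: Subsets are generated by powerset doubling over the sorted distinct elements plus one final sort (instead of A's breadth-first growth with 'y in subsets'/'y in newsets' rescans), and the relation emission precomputes each subset's name and frozenset once, streaming comprehensions over zipped pairs instead of index loops that rebuild set(y) for every pair.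
import Mathlib
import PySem

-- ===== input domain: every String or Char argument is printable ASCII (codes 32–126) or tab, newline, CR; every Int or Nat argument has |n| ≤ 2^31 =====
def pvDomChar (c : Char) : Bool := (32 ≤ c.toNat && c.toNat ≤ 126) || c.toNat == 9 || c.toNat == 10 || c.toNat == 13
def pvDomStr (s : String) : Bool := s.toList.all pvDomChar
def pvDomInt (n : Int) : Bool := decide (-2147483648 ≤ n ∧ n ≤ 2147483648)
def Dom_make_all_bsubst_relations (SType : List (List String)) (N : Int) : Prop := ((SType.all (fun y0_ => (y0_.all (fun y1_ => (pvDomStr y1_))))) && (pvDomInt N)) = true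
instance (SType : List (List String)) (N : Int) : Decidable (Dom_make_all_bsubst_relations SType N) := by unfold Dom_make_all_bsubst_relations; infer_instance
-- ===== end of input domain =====

-- B replaces A's breadth-first subset growth (with its 'y in subsets' / 'y in newsets' rescans) by
-- powerset doubling over the sorted distinct elements plus one sort, and precomputes each subset's
-- name and element set once, emitting the relation lines by comprehensions over zipped pairs instead
-- of index loops that rebuild set(y) for every pair (objective: alternative algorithm, same cost).

-- ===== PORT A =====
def set_to_string (s : List String) : String :=
  let ss := PySem.List.sorted s (fun z => z) false
  let y := ss.foldl (fun y x => y ++ "_" ++ x) "bset"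
  if y = "bset" then "bsetEmpty" else y
def make_set_names (P : List (List String)) : List String :=
  P.foldl (fun res x => res ++ [set_to_string x]) []
def subSetsInner (subsets : List (List String)) (MaxN : Int) (x : List String)
    (newsets : List (List String)) (u : String) : List (List String) :=
  if u ∈ x then newsets
  else
    let y := PySem.List.sorted (x ++ [u]) (fun z => z) false
    if y ∈ subsets then newsets
    else if y ∈ newsets then newsets
    else if (y.length : Int) > MaxN then newsets
    else newsets ++ [y]
def subSetsRound (S : List String) (MaxN : Int) (subsets : List (List String)) : List (List String) :=
  subsets.foldl (fun newsets x => S.foldl (subSetsInner subsets MaxN x) newsets) []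
def subSetsLoop (S : List String) (MaxN : Int) : Nat → List (List String) → List (List String)
  | 0, subsets => subsets
  | fuel+1, subsets =>
      let newsets := subSetsRound S MaxN subsets
      if newsets = [] then subsets else subSetsLoop S MaxN fuel (subsets ++ newsets)
def sub_sets (S : List String) (N : Int) : List (List String) :=
  let MaxN := if N = -1 then (S.length : Int) else N
  PySem.List.sorted (subSetsLoop S MaxN (S.length + 2) [[]]) (fun z => z) false
def make_partial_order_relation_of_set (S : List String) (N : Int) : List String :=
  let P := sub_sets S N
  let Names := make_set_names P
  (PySem.List.pyRange 0 (P.length : Int) 1).foldl (fun res i =>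
    let x := PySem.List.pyGetD P i []
    let xs := PySem.Set.ofList x
    let pname := "bsubst_of_" ++ PySem.List.pyGetD Names i ""
    let res := res ++ [""]
    let res := res ++ ["% \"bsubst_of\" relations for " ++ PySem.List.pyGetD Names i "" ++ ".\n"]
    let res := res ++ [":- modeb(*," ++ pname ++ "(+bobj))?"]
    (PySem.List.pyRange 0 (P.length : Int) 1).foldl (fun res j =>
      let y := PySem.List.pyGetD P j []
      let ys := PySem.Set.ofList y
      if PySem.Set.issubset ys xs then res ++ [pname ++ "(" ++ PySem.List.pyGetD Names j "" ++ ")."]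
      else res) res) []
def make_all_bsubst_relations (SType : List (List String)) (N : Int) : List String :=
  SType.foldl (fun res S =>
    if PySem.List.pyGetD S 0 "" ≠ "bSet" then res
    else res ++ make_partial_order_relation_of_set (PySem.List.slice S (some 1) (some (S.length : Int))) (-1)) []

-- ===== PORT B =====
def pvBName (x : List String) : String :=
  if x.isEmpty then "bsetEmpty" else PySem.Str.join "_" ("bset" :: x)
def pvPowerset (U : List String) : List (List String) :=
  U.foldl (fun acc u => acc ++ acc.map (fun x => x ++ [u])) [[]]
def make_all_bsubst_relations_alt (SType : List (List String)) (N : Int) : List String :=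
  SType.foldl (fun res S =>
    if PySem.List.pyGetD S 0 "" ≠ "bSet" then res
    else
      let subsets := pvPowerset (PySem.List.sorted (PySem.Set.ofList (PySem.List.slice S (some 1) none)) (fun z => z) false)
      let P := PySem.List.sorted subsets (fun z => z) false
      let names := P.map pvBName
      let sets := P.map (fun x => PySem.Set.ofList x)
      let pairs := names.zip sets
      res ++ pairs.flatMap (fun p =>
        ["", "% \"bsubst_of\" relations for " ++ p.1 ++ ".\n", ":- modeb(*,bsubst_of_" ++ p.1 ++ "(+bobj))?"] ++
        (pairs.filter (fun q => PySem.Set.issubset q.2 p.2)).map (fun q => "bsubst_of_" ++ p.1 ++ "(" ++ q.1 ++ ")."))) []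

-- ===== PRECONDITION & SPEC =====
-- Pre_ excludes only inputs on which the Python A raises: 'S[0]' is an IndexError on an empty inner list.
def Pre_make_all_bsubst_relations (SType : List (List String)) (N : Int) : Prop :=
  ∀ S ∈ SType, S ≠ []
instance (SType : List (List String)) (N : Int) : Decidable (Pre_make_all_bsubst_relations SType N) := by
  unfold Pre_make_all_bsubst_relations; infer_instance

def pvWitness_make_all_bsubst_relations : List (List String) × Int := ([["bSet", "a"], ["x"]], -1)

def Spec_make_all_bsubst_relations (SType : List (List String)) (N : Int) (out : List String) : Prop := out = make_all_bsubst_relations_alt SType N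
instance (SType : List (List String)) (N : Int) (out : List String) : Decidable (Spec_make_all_bsubst_relations SType N out) := by unfold Spec_make_all_bsubst_relations; infer_instance

-- ===== CLAIM (what is proved, stated in full; the proofs are below) =====
def Claim_equal_make_all_bsubst_relations : Prop := ∀ (SType : List (List String)) (N : Int), Dom_make_all_bsubst_relations SType N → Pre_make_all_bsubst_relations SType N → Spec_make_all_bsubst_relations SType N (make_all_bsubst_relations SType N)

-- ===== LEMMAS AND PROOFS =====
def pvValid (T : List String) (L : List String) : Prop :=
  L.Pairwise (· < ·) ∧ ∀ a ∈ L, a ∈ T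
theorem pvValid_length_le {T L : List String} (h : pvValid T L) : L.length ≤ T.length := by
  have hsp : List.Subperm L T := List.Nodup.subperm (h.1.imp ne_of_lt) (fun a ha => h.2 a ha)
  exact hsp.length_le
theorem pvFoldl_pres {α β : Type} {P : β → Prop} (f : β → α → β)
    (hmono : ∀ acc u, P acc → P (f acc u)) :
    ∀ (l : List α) (init : β), P init → P (l.foldl f init) := by
  intro l
  induction l with
  | nil => intro init h; simpa using h
  | cons u t ih => intro init h; exact ih (f init u) (hmono init u h)
theorem pvFoldl_mono {α β : Type} (f : List β → α → List β) (h : ∀ acc u, acc ⊆ f acc u) :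
    ∀ (l : List α) (init : List β), init ⊆ l.foldl f init := by
  intro l
  induction l with
  | nil => intro init; simp
  | cons u t ih => intro init; exact fun a ha => ih (f init u) (h init u ha)
theorem pvFoldl_pred_of_mem {α β : Type} {P : β → Prop} (f : β → α → β)
    (hmono : ∀ acc u, P acc → P (f acc u)) :
    ∀ {l : List α} {x : α}, x ∈ l → (∀ acc, P (f acc x)) → ∀ init, P (l.foldl f init) := by
  intro l
  induction l with
  | nil => intro x hx; simp at hx
  | cons u t ih =>
    intro x hx hset init
    rcases List.mem_cons.mp hx with rfl | hx
    · exact pvFoldl_pres f hmono t (f init x) (hset init)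
    · exact ih hx hset (f init u)
theorem pvInner_subset (subsets : List (List String)) (MaxN : Int) (x : List String)
    (ns : List (List String)) (u : String) : ns ⊆ subSetsInner subsets MaxN x ns u := by
  simp only [subSetsInner]
  repeat' split_ifs <;> simp
theorem pvPairwiseLt {y : List String} (h1 : y.Pairwise (fun a b => a ≤ b)) (h2 : y.Nodup) :
    y.Pairwise (· < ·) :=
  (h1.and h2).imp (fun h => lt_of_le_of_ne h.1 h.2)
theorem pvSortedValid {T : List String} {x : List String} {u : String}
    (hx : pvValid T x) (hu : u ∈ T) (hux : u ∉ x) :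
    pvValid T (PySem.List.sorted (x ++ [u]) (fun z => z) false) ∧
    (PySem.List.sorted (x ++ [u]) (fun z => z) false).length = x.length + 1 := by
  have hperm := PySem.List.sorted_perm (x ++ [u]) (fun z => z) false
  have hnd : (x ++ [u]).Nodup := by
    simp only [List.nodup_append, List.nodup_cons, List.not_mem_nil, not_false_iff,
      List.nodup_nil, and_true, true_and]
    exact ⟨hx.1.imp ne_of_lt, by simpa using (by intro a ha h; exact hux (h ▸ ha) : ∀ a ∈ x, ¬ a = u)⟩
  have hnd' : (PySem.List.sorted (x ++ [u]) (fun z => z) false).Nodup := hperm.nodup_iff.mpr hnd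
  have hpw : (PySem.List.sorted (x ++ [u]) (fun z => z) false).Pairwise (fun a b => a ≤ b) := by
    have := PySem.List.sorted_pairwise (x ++ [u]) (fun z => z)
    simpa using this
  refine ⟨⟨pvPairwiseLt hpw hnd', ?_⟩, ?_⟩
  · intro a ha
    have : a ∈ x ++ [u] := hperm.mem_iff.mp ha
    rcases List.mem_append.mp this with h | h
    · exact hx.2 a h
    · simp at h; subst h; exact hu
  · simpa using hperm.length_eq
theorem pvRound_spec (T : List String) (k : Nat) (subsets : List (List String))
    (hnd : subsets.Nodup)
    (hmem : ∀ L, L ∈ subsets ↔ pvValid T L ∧ L.length ≤ k) :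
    (subSetsRound T (T.length : Int) subsets).Nodup ∧
    (∀ L, L ∈ subSetsRound T (T.length : Int) subsets ↔ pvValid T L ∧ L.length = k + 1) := by
  have hstep : ∀ x, x ∈ subsets → ∀ ns u, u ∈ T →
      (ns.Nodup ∧ ∀ L ∈ ns, pvValid T L ∧ L.length = k + 1) →
      ((subSetsInner subsets (T.length : Int) x ns u).Nodup ∧
        ∀ L ∈ subSetsInner subsets (T.length : Int) x ns u, pvValid T L ∧ L.length = k + 1) := by
    intro x hx ns u hu hg
    obtain ⟨hxv, hxk⟩ := (hmem x).mp hx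
    simp only [subSetsInner]
    split_ifs with h1 h2 h3 h4
    · exact hg
    · exact hg
    · exact hg
    · exact hg
    · obtain ⟨hyv, hylen⟩ := pvSortedValid hxv hu h1
      refine ⟨?_, ?_⟩
      · simp only [List.nodup_append, List.nodup_cons, List.not_mem_nil, not_false_iff,
          List.nodup_nil, and_true, true_and]
        exact ⟨hg.1, by simpa using (by intro L hL h; exact h3 (h ▸ hL) : ∀ L ∈ ns, ¬ L = PySem.List.sorted (x ++ [u]) (fun z => z) false)⟩
      · intro L hL
        rcases List.mem_append.mp hL with h | h
        · exact hg.2 L h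
        · simp at h; subst h
          refine ⟨hyv, ?_⟩
          have hnotle : ¬ ((PySem.List.sorted (x ++ [u]) (fun z => z) false).length ≤ k) :=
            fun hle => h2 ((hmem _).mpr ⟨hyv, hle⟩)
          omega
  have hsound : (subSetsRound T (T.length : Int) subsets).Nodup ∧
      ∀ L ∈ subSetsRound T (T.length : Int) subsets, pvValid T L ∧ L.length = k + 1 := by
    unfold subSetsRound
    refine List.foldlRecOn (motive := fun (b : List (List String)) => b.Nodup ∧ ∀ L ∈ b, pvValid T L ∧ L.length = k + 1) subsets _ ?_ ?_
    · exact ⟨List.nodup_nil, by simp⟩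
    · intro b hb x hx
      exact List.foldlRecOn (motive := fun (b : List (List String)) => b.Nodup ∧ ∀ L ∈ b, pvValid T L ∧ L.length = k + 1) T _ hb (fun b2 hb2 u hu => hstep x hx b2 u hu hb2)
  refine ⟨hsound.1, fun L => ⟨fun hL => hsound.2 L hL, ?_⟩⟩
  rintro ⟨hLv, hLlen⟩
  have hne : L ≠ [] := by intro h; subst h; simp at hLlen
  set u := L.getLast hne with hu
  set x := L.dropLast with hxdef
  have hxu : x ++ [u] = L := List.dropLast_append_getLast hne
  have hxsub : x.Sublist L := List.dropLast_sublist L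
  have hxv : pvValid T x := ⟨List.Pairwise.sublist hxsub hLv.1, fun a ha => hLv.2 a (hxsub.subset ha)⟩
  have hxlen : x.length = k := by
    have : x.length = L.length - 1 := by rw [hxdef]; simp
    omega
  have hxmem : x ∈ subsets := (hmem x).mpr ⟨hxv, by omega⟩
  have humem : u ∈ T := hLv.2 u (List.getLast_mem hne)
  have hLnd : L.Nodup := hLv.1.imp ne_of_lt
  have hux : u ∉ x := by
    intro h
    rw [← hxu] at hLnd
    simp [List.nodup_append] at hLnd
    exact hLnd.2 u h rfl
  have hyL : PySem.List.sorted (x ++ [u]) (fun z => z) false = L := by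
    rw [hxu]
    exact PySem.List.sorted_eq_self_of_pairwise L (fun z => z) (by simpa using hLv.1.imp le_of_lt)
  have hLnotsub : L ∉ subsets := by
    intro h
    have := ((hmem L).mp h).2
    omega
  have hat : ∀ ns, L ∈ subSetsInner subsets (T.length : Int) x ns u := by
    intro ns
    simp only [subSetsInner]
    rw [if_neg hux]
    simp only [hyL]
    rw [if_neg hLnotsub]
    by_cases hns : L ∈ ns
    · rw [if_pos hns]; exact hns
    · rw [if_neg hns, if_neg (by
        have := pvValid_length_le hLv
        push_cast
        omega)]
      simp
  unfold subSetsRound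
  exact pvFoldl_pred_of_mem _
    (fun acc x' h => pvFoldl_mono _ (fun ns u' => pvInner_subset subsets _ x' ns u') T acc h)
    hxmem
    (fun acc => pvFoldl_pred_of_mem _ (fun ns u' h => pvInner_subset subsets _ x ns u' h) humem hat acc)
    []
theorem pvLoop_spec (T : List String) :
    ∀ (fuel k : Nat) (subsets : List (List String)),
      subsets.Nodup →
      (∀ L, L ∈ subsets ↔ pvValid T L ∧ L.length ≤ k) →
      T.length ≤ k + fuel →
      (subSetsLoop T (T.length : Int) fuel subsets).Nodup ∧
      (∀ L, L ∈ subSetsLoop T (T.length : Int) fuel subsets ↔ pvValid T L) := by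
  intro fuel
  induction fuel with
  | zero =>
    intro k subsets hnd hmem hfuel
    simp only [subSetsLoop]
    refine ⟨hnd, fun L => ⟨fun h => ((hmem L).mp h).1, fun h => (hmem L).mpr ⟨h, ?_⟩⟩⟩
    have := pvValid_length_le h
    omega
  | succ fuel ih =>
    intro k subsets hnd hmem hfuel
    obtain ⟨hrnd, hrmem⟩ := pvRound_spec T k subsets hnd hmem
    simp only [subSetsLoop]
    by_cases hempty : subSetsRound T (T.length : Int) subsets = []
    · rw [if_pos hempty]
      refine ⟨hnd, fun L => ⟨fun h => ((hmem L).mp h).1, fun h => (hmem L).mpr ⟨h, ?_⟩⟩⟩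
      by_contra hlen
      -- take the first k+1 elements: a valid subset of size k+1, must be in the (empty) round
      have htake : pvValid T (L.take (k+1)) ∧ (L.take (k+1)).length = k + 1 := by
        refine ⟨⟨List.Pairwise.sublist (List.take_sublist _ _) h.1,
          fun a ha => h.2 a ((List.take_sublist _ _).subset ha)⟩, ?_⟩
        simp; omega
      have := (hrmem (L.take (k+1))).mpr htake
      rw [hempty] at this
      simp at this
    · rw [if_neg hempty]
      refine ih (k+1) (subsets ++ subSetsRound T (T.length : Int) subsets) ?_ ?_ (by omega)
      · refine List.Nodup.append hnd hrnd ?_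
        intro L hL hL2
        have h1 := ((hmem L).mp hL).2
        have h2 := ((hrmem L).mp hL2).2
        omega
      · intro L
        simp only [List.mem_append, hmem, hrmem]
        constructor
        · rintro (⟨h1, h2⟩ | ⟨h1, h2⟩) <;> exact ⟨h1, by omega⟩
        · rintro ⟨h1, h2⟩
          by_cases hc : L.length ≤ k
          · exact Or.inl ⟨h1, hc⟩
          · exact Or.inr ⟨h1, by omega⟩
theorem pvSubSets_spec (T : List String) :
    (subSetsLoop T (T.length : Int) (T.length + 2) [[]]).Nodup ∧
    (∀ L, L ∈ subSetsLoop T (T.length : Int) (T.length + 2) [[]] ↔ pvValid T L) := by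
  refine pvLoop_spec T (T.length + 2) 0 [[]] (by simp) ?_ (by omega)
  intro L
  constructor
  · rintro h
    simp at h
    subst h
    exact ⟨⟨by simp, by simp⟩, by simp⟩
  · rintro ⟨h1, h2⟩
    simp
    cases L with
    | nil => rfl
    | cons a t => simp at h2
theorem pvPow_mem_aux : ∀ (U : List String) (acc : List (List String)) (L : List String),
    L ∈ U.foldl (fun acc u => acc ++ acc.map (fun x => x ++ [u])) acc ↔
      ∃ x ∈ acc, ∃ s, s.Sublist U ∧ L = x ++ s := by
  intro U
  induction U with
  | nil =>
    intro acc L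
    simp only [List.foldl_nil, List.sublist_nil]
    constructor
    · intro h; exact ⟨L, h, [], rfl, by simp⟩
    · rintro ⟨x, hx, s, rfl, rfl⟩; simpa using hx
  | cons u t ih =>
    intro acc L
    simp only [List.foldl_cons]
    rw [ih]
    constructor
    · rintro ⟨x, hx, s, hs, rfl⟩
      rcases List.mem_append.mp hx with h | h
      · exact ⟨x, h, s, hs.cons u, rfl⟩
      · rcases List.mem_map.mp h with ⟨x0, hx0, rfl⟩
        exact ⟨x0, hx0, u :: s, hs.cons₂ u, by simp⟩
    · rintro ⟨x, hx, s, hs, rfl⟩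
      cases hs with
      | cons _ hs' => exact ⟨x, List.mem_append.mpr (Or.inl hx), _, hs', rfl⟩
      | cons₂ _ hs' =>
        rename_i s'
        exact ⟨x ++ [u], List.mem_append.mpr (Or.inr (List.mem_map.mpr ⟨x, hx, rfl⟩)), s', hs', by simp⟩
theorem pvPow_mem (U : List String) (L : List String) : L ∈ pvPowerset U ↔ L.Sublist U := by
  unfold pvPowerset
  rw [pvPow_mem_aux]
  constructor
  · rintro ⟨x, hx, s, hs, rfl⟩
    simp at hx; subst hx; simpa using hs
  · intro h; exact ⟨[], by simp, L, h, rfl⟩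
theorem pvPow_nodup_aux : ∀ (U : List String) (acc : List (List String)),
    acc.Nodup → U.Nodup → (∀ x ∈ acc, ∀ a ∈ x, a ∉ U) →
    (U.foldl (fun acc u => acc ++ acc.map (fun x => x ++ [u])) acc).Nodup := by
  intro U
  induction U with
  | nil => intro acc h _ _; simpa using h
  | cons u t ih =>
    intro acc hacc hU hfresh
    have hU' : u ∉ t ∧ t.Nodup := by simpa using hU
    simp only [List.foldl_cons]
    refine ih _ ?_ hU'.2 ?_
    · refine List.Nodup.append hacc ?_ ?_
      · refine (List.nodup_map_iff_inj_on hacc).mpr ?_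
        intro x hx y hy hxy
        simpa using hxy
      · intro L hL hL2
        rcases List.mem_map.mp hL2 with ⟨x0, hx0, rfl⟩
        exact hfresh (x0 ++ [u]) hL u (by simp) (by simp)
    · intro x hx a ha hat
      rcases List.mem_append.mp hx with h | h
      · exact hfresh x h a ha (by simp [hat])
      · rcases List.mem_map.mp h with ⟨x0, hx0, rfl⟩
        rcases List.mem_append.mp ha with h2 | h2
        · exact hfresh x0 hx0 a h2 (by simp [hat])
        · simp at h2; subst h2; exact hU'.1 hat
theorem pvPow_nodup {U : List String} (h : U.Nodup) : (pvPowerset U).Nodup := by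
  unfold pvPowerset
  exact pvPow_nodup_aux U [[]] (by simp) h (by simp)
theorem pvSorted_instLL (xs : List (List String)) :
    PySem.List.sorted xs (fun z => z) false =
      @PySem.List.sorted (List String) (List String) List.instLinearOrder.toLT
        LinearOrder.toDecidableLT xs (fun z => z) false := by
  have h : (fun a b => List.decidableLT a b : DecidableLT (List String)) = LinearOrder.toDecidableLT := by
    funext a b
    exact Subsingleton.elim _ _
  rw [show (PySem.List.sorted xs (fun z => z) false : List (List String)) =
      @PySem.List.sorted (List String) (List String) List.instLT (fun a b => List.decidableLT a b)
        xs (fun z => z) false from rfl, h]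
theorem pvP_eq (T : List String) :
    sub_sets T (-1) =
      PySem.List.sorted (pvPowerset (PySem.List.sorted (PySem.Set.ofList T) (fun z => z) false)) (fun z => z) false := by
  obtain ⟨hFnd, hFmem⟩ := pvSubSets_spec T
  set U := PySem.List.sorted (PySem.Set.ofList T) (fun z => z) false with hU
  have hUpl : U.Pairwise (· < ·) := PySem.List.sorted_ofList_pairwise_lt T
  have hUnd : U.Nodup := hUpl.imp ne_of_lt
  have hUmem : ∀ a, a ∈ U ↔ a ∈ T := by
    intro a
    rw [hU, PySem.List.mem_sorted, PySem.Set.mem_ofList]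
  have hpowmem : ∀ L, L ∈ pvPowerset U ↔ pvValid T L := by
    intro L
    rw [pvPow_mem]
    constructor
    · intro h
      exact ⟨List.Pairwise.sublist h hUpl, fun a ha => (hUmem a).mp (h.subset ha)⟩
    · rintro ⟨h1, h2⟩
      have hsp : List.Subperm L U :=
        List.Nodup.subperm (h1.imp ne_of_lt) (fun a ha => (hUmem a).mpr (h2 a ha))
      exact List.sublist_of_subperm_of_pairwise hsp (h1.imp le_of_lt) (hUpl.imp le_of_lt)
  have hperm : (subSetsLoop T (T.length : Int) (T.length + 2) [[]]).Perm (pvPowerset U) := by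
    rw [List.perm_ext_iff_of_nodup hFnd (pvPow_nodup hUnd)]
    intro L
    rw [hFmem, hpowmem]
  unfold sub_sets
  have hif : (if (-1 : Int) = -1 then (T.length : Int) else -1) = (T.length : Int) := if_pos rfl
  rw [hif, pvSorted_instLL, pvSorted_instLL]
  exact PySem.List.sorted_eq_sorted_of_perm _ _ (fun z => z) (fun a b h => h) hperm
theorem pvJoin_cons_cons (z : String) (t : List String) (b : String) :
    PySem.Str.join "_" (b :: z :: t) = b ++ "_" ++ PySem.Str.join "_" (z :: t) := by
  apply String.toList_inj.mp
  simp [PySem.Str.toList_join, PySem.Chars.join_cons_cons, String.toList_append]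
theorem pvFold_join (ss : List String) : ∀ b : String,
    ss.foldl (fun y x => y ++ "_" ++ x) b = PySem.Str.join "_" (b :: ss) := by
  induction ss with
  | nil =>
    intro b
    apply String.toList_inj.mp
    simp [PySem.Str.toList_join, PySem.Chars.join_singleton]
  | cons z t ih =>
    intro b
    simp only [List.foldl_cons]
    rw [ih (b ++ "_" ++ z)]
    cases t with
    | nil =>
      apply String.toList_inj.mp
      simp [PySem.Str.toList_join, PySem.Chars.join_singleton, PySem.Chars.join_cons_cons]
    | cons w t' =>
      simp only [pvJoin_cons_cons]
      simp [String.append_assoc]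
theorem pvName_eq {x : List String} (h : x.Pairwise (· < ·)) : set_to_string x = pvBName x := by
  simp only [set_to_string, pvBName]
  rw [PySem.List.sorted_eq_self_of_pairwise x (fun z => z) (by simpa using h.imp le_of_lt)]
  rw [pvFold_join]
  cases x with
  | nil =>
    have hj : PySem.Str.join "_" ["bset"] = "bset" :=
      String.toList_inj.mp (by simp [PySem.Str.toList_join, PySem.Chars.join_singleton])
    simp [hj]
  | cons z t =>
    rw [if_neg, if_neg (by simp)]
    intro heq
    have := congrArg String.toList heq
    rw [pvJoin_cons_cons] at this
    simp only [String.toList_append] at this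
    have hlen := congrArg List.length this
    simp [List.length_append] at hlen
def pvEmitBlock (P : List (List String)) (x : List String) : List String :=
  ["", "% \"bsubst_of\" relations for " ++ set_to_string x ++ ".\n",
   ":- modeb(*," ++ ("bsubst_of_" ++ set_to_string x) ++ "(+bobj))?"] ++
  (P.filter (fun y => PySem.Set.issubset (PySem.Set.ofList y) (PySem.Set.ofList x))).map
    (fun y => ("bsubst_of_" ++ set_to_string x) ++ "(" ++ set_to_string y ++ ").")
theorem pvNames_eq_map (P : List (List String)) : make_set_names P = P.map set_to_string := by
  unfold make_set_names
  rw [PySem.List.foldl_append_singleton_eq_map]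
  simp
theorem pvGetD_map_name (P : List (List String)) (k : Nat) (hk : k < P.length) :
    (P.map set_to_string).getD k "" = set_to_string (P.getD k []) := by
  simp [List.getD_eq_getElem?_getD, hk]
theorem pvMPOR (T : List String) : make_partial_order_relation_of_set T (-1) =
    (sub_sets T (-1)).flatMap (pvEmitBlock (sub_sets T (-1))) := by
  simp only [make_partial_order_relation_of_set]
  rw [pvNames_eq_map]
  refine (PySem.List.foldl_congr_mem _ _
    (fun acc i => acc ++ pvEmitBlock (sub_sets T (-1)) (PySem.List.pyGetD (sub_sets T (-1)) i [])) [] ?_).trans ?_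
  · intro acc i hi
    obtain ⟨h0, hlt⟩ := PySem.List.mem_pyRange_one.mp hi
    lift i to ℕ using h0 with k
    have hk : k < (sub_sets T (-1)).length := by exact_mod_cast hlt
    rw [PySem.List.pyGetD_natCast, PySem.List.pyGetD_natCast, pvGetD_map_name _ _ hk]
    refine (PySem.List.foldl_congr_mem _ _
      (fun res j => if PySem.Set.issubset (PySem.Set.ofList (PySem.List.pyGetD (sub_sets T (-1)) j []))
            (PySem.Set.ofList ((sub_sets T (-1)).getD k [])) then
          res ++ ["bsubst_of_" ++ set_to_string ((sub_sets T (-1)).getD k []) ++ "(" ++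
            set_to_string (PySem.List.pyGetD (sub_sets T (-1)) j []) ++ ")."]
        else res) _ ?_).trans ?_
    · intro res j hj
      obtain ⟨hj0, hjlt⟩ := PySem.List.mem_pyRange_one.mp hj
      lift j to ℕ using hj0 with n
      have hn : n < (sub_sets T (-1)).length := by exact_mod_cast hjlt
      rw [PySem.List.pyGetD_natCast, PySem.List.pyGetD_natCast, pvGetD_map_name _ _ hn]
    · rw [PySem.List.foldl_pyRange_zero_pyGetD' (sub_sets T (-1)) []
          (fun res y => if PySem.Set.issubset (PySem.Set.ofList y)
              (PySem.Set.ofList ((sub_sets T (-1)).getD k [])) then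
            res ++ ["bsubst_of_" ++ set_to_string ((sub_sets T (-1)).getD k []) ++ "(" ++
              set_to_string y ++ ")."]
          else res)]
      rw [PySem.List.foldl_append_if
        (fun y => PySem.Set.issubset (PySem.Set.ofList y) (PySem.Set.ofList ((sub_sets T (-1)).getD k [])))
        (fun y => "bsubst_of_" ++ set_to_string ((sub_sets T (-1)).getD k []) ++ "(" ++ set_to_string y ++ ").")]
      simp [pvEmitBlock]
  · rw [PySem.List.foldl_pyRange_zero_pyGetD' (sub_sets T (-1)) []
        (fun acc x => acc ++ pvEmitBlock (sub_sets T (-1)) x) []]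
    rw [PySem.List.foldl_append_eq_flatMap]
    simp
theorem pvPowMemValid (T : List String) (L : List String) :
    L ∈ pvPowerset (PySem.List.sorted (PySem.Set.ofList T) (fun z => z) false) ↔ pvValid T L := by
  have hUpl : (PySem.List.sorted (PySem.Set.ofList T) (fun z => z) false).Pairwise (· < ·) :=
    PySem.List.sorted_ofList_pairwise_lt T
  have hUmem : ∀ a, a ∈ PySem.List.sorted (PySem.Set.ofList T) (fun z => z) false ↔ a ∈ T := by
    intro a
    rw [PySem.List.mem_sorted, PySem.Set.mem_ofList]
  rw [pvPow_mem]
  constructor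
  · intro h
    exact ⟨List.Pairwise.sublist h hUpl, fun a ha => (hUmem a).mp (h.subset ha)⟩
  · rintro ⟨h1, h2⟩
    have hsp : List.Subperm L (PySem.List.sorted (PySem.Set.ofList T) (fun z => z) false) :=
      List.Nodup.subperm (h1.imp ne_of_lt) (fun a ha => (hUmem a).mpr (h2 a ha))
    exact List.sublist_of_subperm_of_pairwise hsp (h1.imp le_of_lt) (hUpl.imp le_of_lt)
theorem pvPerSet (T : List String) :
    make_partial_order_relation_of_set T (-1) =
      (((PySem.List.sorted (pvPowerset (PySem.List.sorted (PySem.Set.ofList T) (fun z => z) false)) (fun z => z) false).map pvBName).zip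
       ((PySem.List.sorted (pvPowerset (PySem.List.sorted (PySem.Set.ofList T) (fun z => z) false)) (fun z => z) false).map (fun x => PySem.Set.ofList x))).flatMap
        (fun p =>
          ["", "% \"bsubst_of\" relations for " ++ p.1 ++ ".\n", ":- modeb(*,bsubst_of_" ++ p.1 ++ "(+bobj))?"] ++
          ((((PySem.List.sorted (pvPowerset (PySem.List.sorted (PySem.Set.ofList T) (fun z => z) false)) (fun z => z) false).map pvBName).zip
            ((PySem.List.sorted (pvPowerset (PySem.List.sorted (PySem.Set.ofList T) (fun z => z) false)) (fun z => z) false).map (fun x => PySem.Set.ofList x))).filter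
              (fun q => PySem.Set.issubset q.2 p.2)).map (fun q => "bsubst_of_" ++ p.1 ++ "(" ++ q.1 ++ ").")) := by
  rw [pvMPOR, pvP_eq]
  set P := PySem.List.sorted (pvPowerset (PySem.List.sorted (PySem.Set.ofList T) (fun z => z) false)) (fun z => z) false with hP
  have hPval : ∀ x ∈ P, pvValid T x := by
    intro x hx
    rw [hP, PySem.List.mem_sorted] at hx
    exact (pvPowMemValid T x).mp hx
  rw [List.zip_map', List.flatMap_map]
  rw [List.flatMap, List.flatMap]
  refine congrArg List.flatten (List.map_congr_left ?_)
  intro x hx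
  have hxv := hPval x hx
  have hname := (pvName_eq hxv.1).symm
  simp only [hname, pvEmitBlock]
  refine congrArg₂ (· ++ ·) ?_ ?_
  · rw [← String.append_assoc]
    rfl
  · rw [List.filter_map]
    rw [List.map_map]
    refine List.map_congr_left ?_
    intro y hy
    have hyP : y ∈ P := List.mem_of_mem_filter hy
    have hnamey := (pvName_eq (hPval y hyP).1).symm
    simp only [Function.comp, hnamey]
theorem pvMain (SType : List (List String)) (N : Int) :
    make_all_bsubst_relations SType N = make_all_bsubst_relations_alt SType N := by
  simp only [make_all_bsubst_relations, make_all_bsubst_relations_alt]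
  refine PySem.List.foldl_congr_mem _ _ _ [] ?_
  intro acc S hS
  by_cases hc : PySem.List.pyGetD S 0 "" ≠ "bSet"
  · rw [if_pos hc, if_pos hc]
  · rw [if_neg hc, if_neg hc]
    have hslice1 : PySem.List.slice S (some 1) (some (S.length : Int)) = S.drop 1 := by
      rw [PySem.List.slice_toNat S (by norm_num) (by positivity)]
      exact List.take_of_length_le (by simp)
    have hslice2 : PySem.List.slice S (some 1) none = S.drop 1 := by
      rw [PySem.List.slice_from S (by norm_num)]
      norm_num
    rw [hslice1, hslice2, pvPerSet]
-- ===== VERDICT (by name: the statement is the Claim_ definition above) =====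
theorem make_all_bsubst_relations_spec : Claim_equal_make_all_bsubst_relations := by
  intro SType N _ _
  exact pvMain SType N
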